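-- pv_equiv track=rewrite | github.com/mmarfinetz/uni-v4-hook | script/run_backtest_window_queue.py | _redacted_command
-- ===== SOURCE A (Python) =====
-- def _redacted_command(cmd: list[str]) -> str:
--     redacted: list[str] = []
--     skip_next = False
--     for index, part in enumerate(cmd):
--         if skip_next:
--             redacted.append("<redacted>")
--             skip_next = False
--             continue
--         redacted.append(part)
--         if part == "--rpc-url" and index + 1 < len(cmd):
--             skip_next = True
--     return " ".join(redacted)
-- ===== SOURCE B (Python) =====
-- def _redacted_command(cmd: list[str]) -> str:
--     parts: list[str] = []
--     rest = cmd
--     while True: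
--         try:
--             k = rest.index("--rpc-url")
--         except ValueError:
--             k = len(rest)
--         if k + 1 >= len(rest):
--             parts.extend(rest)
--             break
--         parts.extend(rest[:k + 1])
--         parts.append("<redacted>")
--         rest = rest[k + 2:]
--     return " ".join(parts)
-- ===== Notes on version B (the rewrite author's own statement) =====
-- stated objective: alternative
-- what changed: Replaces the elementwise skip_next scan with a search-and-split loop: repeatedly locate the next '--rpc-url' with list.index, copy the whole untouched segment through the flag by slicing, append '<redacted>', and continue on the slice after the consumed value.
import Mathlib
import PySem

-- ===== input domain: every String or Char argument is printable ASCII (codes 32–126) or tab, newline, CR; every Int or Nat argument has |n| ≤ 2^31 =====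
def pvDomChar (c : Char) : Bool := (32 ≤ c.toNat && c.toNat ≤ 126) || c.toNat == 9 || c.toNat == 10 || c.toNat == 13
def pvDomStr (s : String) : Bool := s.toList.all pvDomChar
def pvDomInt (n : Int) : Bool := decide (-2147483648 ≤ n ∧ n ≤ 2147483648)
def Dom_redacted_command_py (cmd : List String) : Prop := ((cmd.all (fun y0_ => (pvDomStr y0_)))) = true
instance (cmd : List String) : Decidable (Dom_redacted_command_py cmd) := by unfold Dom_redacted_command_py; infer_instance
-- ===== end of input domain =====

-- B replaces A's elementwise skip_next scan with a search-and-split loop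
-- (list.index + slicing per '--rpc-url' occurrence); objective: alternative.

-- ===== PORT A =====
-- fold step of A's loop (L = len(cmd)); state = (redacted, skip_next)
def redactStepA (L : Int) (st : List String × Bool) (p : Int × String) : List String × Bool :=
  if st.2 then (st.1 ++ ["<redacted>"], false)
  else
    let r := st.1 ++ [p.2]
    if p.2 = "--rpc-url" ∧ p.1 + 1 < L then (r, true) else (r, false)

def redacted_command_py (cmd : List String) : String :=
  let res := (PySem.List.enumerate cmd).foldl (redactStepA (cmd.length : Int)) ([], false)
  PySem.Str.join " " res.1

-- ===== PORT B =====
-- B's while-True loop: rest is the unprocessed suffix, parts the output so far;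
-- try rest.index(...) / except → index? with default len(rest)
def redactGoB (rest parts : List String) : List String :=
  let k := (PySem.List.index? rest "--rpc-url").getD rest.length
  if rest.length ≤ k + 1 then parts ++ rest
  else redactGoB (rest.drop (k + 2)) (parts ++ rest.take (k + 1) ++ ["<redacted>"])
termination_by rest.length
decreasing_by simp_all; omega

def redacted_command_py_alt (cmd : List String) : String :=
  PySem.Str.join " " (redactGoB cmd [])

-- ===== PRECONDITION & SPEC =====
def Spec_redacted_command_py (cmd : List String) (out : String) : Prop := out = redacted_command_py_alt cmd
instance (cmd : List String) (out : String) : Decidable (Spec_redacted_command_py cmd out) := by unfold Spec_redacted_command_py; infer_instance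

-- ===== CLAIM (what is proved, stated in full; the proofs are below) =====
def Claim_equal_redacted_command_py : Prop := ∀ (cmd : List String), Dom_redacted_command_py cmd → Spec_redacted_command_py cmd (redacted_command_py cmd)

-- ===== LEMMAS AND PROOFS =====

-- reference shape of the redacted token list, used to relate the two loops
def redactRef : List String → List String
  | [] => []
  | [x] => [x]
  | x :: y :: rest =>
    if x = "--rpc-url" then x :: "<redacted>" :: redactRef rest
    else x :: redactRef (y :: rest)

lemma foldA_eq_ref (L : Int) (xs : List String) : ∀ (n : Int) (acc : List String),
    n + xs.length = L →
    (PySem.List.enumerate xs n).foldl (redactStepA L) (acc, false) = (acc ++ redactRef xs, false) := by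
  induction xs using redactRef.induct with
  | case1 =>
      intro n acc _
      simp [PySem.List.enumerate_nil, redactRef]
  | case2 x =>
      intro n acc h
      have hnl : ¬ (n + 1 < L) := by simp at h; omega
      simp [PySem.List.enumerate_cons, PySem.List.enumerate_nil, redactRef, redactStepA, hnl]
  | case3 y rest ih =>
      intro n acc h
      have hlt : n + 1 < L := by simp at h; omega
      simp only [PySem.List.enumerate_cons, List.foldl_cons, redactRef]
      have s1 : redactStepA L (acc, false) (n, "--rpc-url") = (acc ++ ["--rpc-url"], true) := by
        simp [redactStepA, hlt]
      have s2 : redactStepA L (acc ++ ["--rpc-url"], true) (n + 1, y) =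
          (acc ++ ["--rpc-url"] ++ ["<redacted>"], false) := by
        simp [redactStepA]
      rw [s1, s2, ih (n + 1 + 1) _ (by simp at h ⊢; omega)]
      simp
  | case4 x y rest hx ih =>
      intro n acc h
      rw [PySem.List.enumerate_cons, List.foldl_cons]
      have s1 : redactStepA L (acc, false) (n, x) = (acc ++ [x], false) := by
        simp [redactStepA, hx]
      rw [s1, ih (n + 1) _ (by simp at h ⊢; omega)]
      simp [redactRef, hx]

lemma redactRef_cons_ne (x : String) (l : List String) (hx : x ≠ "--rpc-url") :
    redactRef (x :: l) = x :: redactRef l := by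
  cases l with
  | nil => simp [redactRef]
  | cons y t => simp [redactRef, hx]

lemma redactRef_no_flag_append (xs ys : List String) (h : "--rpc-url" ∉ xs) :
    redactRef (xs ++ ys) = xs ++ redactRef ys := by
  induction xs with
  | nil => simp
  | cons x t ih =>
      have hx : x ≠ "--rpc-url" := fun hh => h (hh ▸ List.mem_cons_self)
      rw [List.cons_append, redactRef_cons_ne x _ hx, ih (fun hm => h (List.mem_cons_of_mem _ hm))]
      simp

lemma goB_eq_ref (rest : List String) : ∀ (parts : List String),
    redactGoB rest parts = parts ++ redactRef rest := by
  induction hn : rest.length using Nat.strong_induction_on generalizing rest with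
  | _ n ih =>
    intro parts
    rw [redactGoB]
    cases hidx : PySem.List.index? rest "--rpc-url" with
    | none =>
        have hnot : "--rpc-url" ∉ rest := (PySem.List.index?_eq_none_iff _ _).mp hidx
        have : redactRef rest = rest := by
          have := redactRef_no_flag_append rest [] hnot
          simpa [redactRef] using this
        simp [this]
    | some k =>
        obtain ⟨pre, suf, hsplit, hlen, hnot⟩ := (PySem.List.index?_eq_some_iff _ _ _).mp hidx
        subst hsplit hn hlen
        simp only [Option.getD_some]
        by_cases hle : (pre ++ "--rpc-url" :: suf).length ≤ pre.length + 1
        · have hsuf : suf = [] := by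
            simp only [List.length_append, List.length_cons] at hle
            exact List.eq_nil_of_length_eq_zero (by omega)
          subst hsuf
          rw [if_pos hle, redactRef_no_flag_append pre _ hnot]
          simp [redactRef]
        · rw [if_neg hle]
          cases suf with
          | nil => simp at hle
          | cons v suf' =>
            have htake : (pre ++ "--rpc-url" :: v :: suf').take (pre.length + 1) = pre ++ ["--rpc-url"] := by
              simp [List.take_append]
            have hdrop : (pre ++ "--rpc-url" :: v :: suf').drop (pre.length + 2) = suf' := by
              simp [List.drop_append]
            rw [htake, hdrop,
              ih suf'.length (by simp; omega) suf' rfl,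
              redactRef_no_flag_append pre _ hnot]
            simp [redactRef]

-- ===== VERDICT (by name: the statement is the Claim_ definition above) =====
theorem redacted_command_py_spec : Claim_equal_redacted_command_py := by
  intro cmd _
  unfold Spec_redacted_command_py redacted_command_py redacted_command_py_alt
  rw [goB_eq_ref cmd []]
  rw [show (PySem.List.enumerate cmd) = (PySem.List.enumerate cmd 0) from rfl,
      foldA_eq_ref (cmd.length : Int) cmd 0 [] (by simp)]
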